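-- pv_equiv track=rewrite | github.com/vannguyenh/RNAPhylo | scripts/nci_scripts/main_fullAlignment.py | validate_brackets_with_positions
-- ===== SOURCE A (Python) =====
-- from typing import Optional, Tuple, List, Dict
--
-- MATCHING_BRACKETS: Dict[str, str] = {')': '(', ']': '[', '}': '{', '>': '<'}
--
-- MATCHING_PSEUDOKNOTS: Dict[str, str] = {'a': 'A', 'b': 'B', 'c': 'C', 'd': 'D'}
--
-- def validate_brackets_with_positions(rna_structure: str) -> Tuple[bool, List[Tuple[int, int]]]:
--     """
--     Validates the bracket structure of the RNA structure.
--     Returns a tuple (is_valid, list of pairing positions).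
--     """
--     stacks = {'(': [], '[': [], '{': [], '<': [], 'A': [], 'B': [], 'C': [], 'D': []}
--     pairing_positions = {k: [] for k in stacks.keys()}
--
--     for i, char in enumerate(rna_structure):
--         if char in MATCHING_BRACKETS.values():
--             stacks[char].append(i)
--         elif char in MATCHING_BRACKETS:
--             if stacks.get(MATCHING_BRACKETS[char]):
--                 opening_index = stacks[MATCHING_BRACKETS[char]].pop()
--                 pairing_positions[MATCHING_BRACKETS[char]].append((opening_index, i))
--             else:
--                 return False, []
--         elif char in MATCHING_PSEUDOKNOTS.values():
--             stacks[char].append(i)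
--         elif char in MATCHING_PSEUDOKNOTS:
--             if stacks.get(MATCHING_PSEUDOKNOTS[char]):
--                 opening_index = stacks[MATCHING_PSEUDOKNOTS[char]].pop()
--                 pairing_positions[MATCHING_PSEUDOKNOTS[char]].append((opening_index, i))
--             else:
--                 return False, []
--     all_matched = all(len(stack) == 0 for stack in stacks.values())
--     flat_positions = [pos for pairs in pairing_positions.values() for pos in pairs]
--     return all_matched, sorted(flat_positions, key=lambda x: x[1])
-- ===== SOURCE B (Python) =====
-- from typing import Tuple, List, Dict
--
-- MATCHING_BRACKETS: Dict[str, str] = {')': '(', ']': '[', '}': '{', '>': '<'}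
--
-- MATCHING_PSEUDOKNOTS: Dict[str, str] = {'a': 'A', 'b': 'B', 'c': 'C', 'd': 'D'}
--
-- def validate_brackets_with_positions(rna_structure: str) -> Tuple[bool, List[Tuple[int, int]]]:
--     """Per-family scan: one independent stack pass over the string for each
--     bracket/pseudoknot family, then merge the collected pairs."""
--     families = [(o, c) for c, o in MATCHING_BRACKETS.items()] + \
--                [(o, c) for c, o in MATCHING_PSEUDOKNOTS.items()]
--     results = []
--     for o, c in families:
--         stack: List[int] = []
--         pairs: List[Tuple[int, int]] = []
--         for i, ch in enumerate(rna_structure):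
--             if ch == o:
--                 stack.append(i)
--             elif ch == c:
--                 if not stack:
--                     return False, []
--                 pairs.append((stack.pop(), i))
--         results.append((stack, pairs))
--     all_matched = all(not stack for stack, _ in results)
--     flat_positions = [p for _, pairs in results for p in pairs]
--     return all_matched, sorted(flat_positions, key=lambda x: x[1])
-- ===== Notes on version B (the rewrite author's own statement) =====
-- stated objective: alternative
-- what changed: A does one combined scan keeping a dict of stacks and a dict of pair lists for all 8 bracket/pseudoknot families at once; B instead scans the string once per family with a single independent stack, then merges the per-family pair lists and sorts by closing index.
import Mathlib
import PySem

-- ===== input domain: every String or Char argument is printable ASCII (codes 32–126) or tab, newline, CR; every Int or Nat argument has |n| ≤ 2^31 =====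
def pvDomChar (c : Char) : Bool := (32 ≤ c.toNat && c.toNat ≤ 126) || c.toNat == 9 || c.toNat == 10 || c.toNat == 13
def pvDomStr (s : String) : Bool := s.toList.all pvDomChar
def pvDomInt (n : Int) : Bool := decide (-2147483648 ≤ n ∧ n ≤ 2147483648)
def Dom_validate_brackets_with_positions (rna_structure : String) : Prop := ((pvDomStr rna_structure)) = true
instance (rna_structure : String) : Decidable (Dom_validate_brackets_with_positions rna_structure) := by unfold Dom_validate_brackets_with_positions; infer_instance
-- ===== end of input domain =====

-- B replaces A's single combined scan over dict-of-stacks by an independent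
-- per-family stack scan for each of the 8 bracket/pseudoknot families (objective: alternative).

-- ===== PORT A =====
-- fixed-key dicts 'stacks'/'pairing_positions' are ported as functions Char → List updated pointwise
def pvUpd {α : Type} (f : Char → α) (k : Char) (v : α) : Char → α :=
  fun x => if x = k then v else f x

def pvKeys : List Char := ['(', '[', '{', '<', 'A', 'B', 'C', 'D']

-- MATCHING_BRACKETS[char] / MATCHING_PSEUDOKNOTS[char] (closer → opener), on their key sets
def pvMB (c : Char) : Char :=
  if c = ')' then '(' else if c = ']' then '[' else if c = '}' then '{' else '<'
def pvMP (c : Char) : Char :=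
  if c = 'a' then 'A' else if c = 'b' then 'B' else if c = 'c' then 'C' else 'D'

-- the for-loop with its early 'return False, []' (= none)
def pvALoop : List (Int × Char) → (Char → List Int) → (Char → List (Int × Int)) →
    Option ((Char → List Int) × (Char → List (Int × Int)))
  | [], st, pp => some (st, pp)
  | (i, ch) :: rest, st, pp =>
    if ch ∈ (['(', '[', '{', '<'] : List Char) then
      pvALoop rest (pvUpd st ch (st ch ++ [i])) pp
    else if ch ∈ ([')', ']', '}', '>'] : List Char) then
      match (st (pvMB ch)).getLast? with
      | none => none
      | some j => pvALoop rest (pvUpd st (pvMB ch) (st (pvMB ch)).dropLast)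
                    (pvUpd pp (pvMB ch) (pp (pvMB ch) ++ [(j, i)]))
    else if ch ∈ (['A', 'B', 'C', 'D'] : List Char) then
      pvALoop rest (pvUpd st ch (st ch ++ [i])) pp
    else if ch ∈ (['a', 'b', 'c', 'd'] : List Char) then
      match (st (pvMP ch)).getLast? with
      | none => none
      | some j => pvALoop rest (pvUpd st (pvMP ch) (st (pvMP ch)).dropLast)
                    (pvUpd pp (pvMP ch) (pp (pvMP ch) ++ [(j, i)]))
    else pvALoop rest st pp

def validate_brackets_with_positions (rna_structure : String) : Bool × (List (Int × Int)) :=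
  match pvALoop (PySem.List.enumerate rna_structure.toList) (fun _ => []) (fun _ => []) with
  | none => (false, [])
  | some (st, pp) =>
    (pvKeys.all fun k => (st k).isEmpty,
     PySem.List.sorted (pvKeys.flatMap fun k => pp k) (fun x => x.2) false)

-- ===== PORT B =====
def pvFams : List (Char × Char) :=
  [('(', ')'), ('[', ']'), ('{', '}'), ('<', '>'), ('A', 'a'), ('B', 'b'), ('C', 'c'), ('D', 'd')]

-- one family's whole-string scan; none = unmatched closer (early 'return False, []')
def pvFamScan (o c : Char) : List (Int × Char) → List Int → List (Int × Int) →
    Option (List Int × List (Int × Int))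
  | [], st, ps => some (st, ps)
  | (i, ch) :: rest, st, ps =>
    if ch = o then pvFamScan o c rest (st ++ [i]) ps
    else if ch = c then
      match st.getLast? with
      | none => none
      | some j => pvFamScan o c rest st.dropLast (ps ++ [(j, i)])
    else pvFamScan o c rest st ps

def pvRunFams : List (Char × Char) → List (Int × Char) →
    Option (List (List Int × List (Int × Int)))
  | [], _ => some []
  | (o, c) :: fs, l =>
    match pvFamScan o c l [] [] with
    | none => none
    | some r => (pvRunFams fs l).map (r :: ·)

def validate_brackets_with_positions_alt (rna_structure : String) : Bool × (List (Int × Int)) :=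
  match pvRunFams pvFams (PySem.List.enumerate rna_structure.toList) with
  | none => (false, [])
  | some rs =>
    (rs.all fun r => r.1.isEmpty,
     PySem.List.sorted (rs.flatMap fun r => r.2) (fun x => x.2) false)

-- ===== PRECONDITION & SPEC =====
def Spec_validate_brackets_with_positions (rna_structure : String) (out : Bool × (List (Int × Int))) : Prop := out = validate_brackets_with_positions_alt rna_structure
instance (rna_structure : String) (out : Bool × (List (Int × Int))) : Decidable (Spec_validate_brackets_with_positions rna_structure out) := by unfold Spec_validate_brackets_with_positions; infer_instance

-- ===== CLAIM (what is proved, stated in full; the proofs are below) =====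
def Claim_equal_validate_brackets_with_positions : Prop := ∀ (rna_structure : String), Dom_validate_brackets_with_positions rna_structure → Spec_validate_brackets_with_positions rna_structure (validate_brackets_with_positions rna_structure)

-- ===== LEMMAS AND PROOFS =====

-- projection: a successful combined scan restricts, family by family, to the per-family scans
lemma pvL1 : ∀ (l : List (Int × Char)) (st : Char → List Int) (pp : Char → List (Int × Int))
    (st' : Char → List Int) (pp' : Char → List (Int × Int)),
    pvALoop l st pp = some (st', pp') → ∀ o c, (o, c) ∈ pvFams →
    pvFamScan o c l (st o) (pp o) = some (st' o, pp' o) := by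
  intro l
  induction l with
  | nil =>
    intro st pp st' pp' h o c hm
    simp [pvALoop] at h
    simp [pvFamScan, h.1, h.2]
  | cons hd rest ih =>
    obtain ⟨i, ch⟩ := hd
    intro st pp st' pp' h o c hm
    by_cases h1 : ch ∈ (['(', '[', '{', '<'] : List Char)
    · rcases (by simpa using h1 : ch = '(' ∨ ch = '[' ∨ ch = '{' ∨ ch = '<') with rfl | rfl | rfl | rfl <;>
      · simp [pvALoop] at h
        fin_cases hm <;> simpa [pvFamScan, pvUpd] using ih _ _ _ _ h _ _ (by simp [pvFams])
    · by_cases h2 : ch ∈ ([')', ']', '}', '>'] : List Char)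
      · rcases (by simpa using h2 : ch = ')' ∨ ch = ']' ∨ ch = '}' ∨ ch = '>') with rfl | rfl | rfl | rfl <;>
        · simp [pvALoop, pvMB] at h
          split at h
          next hj => simp at h
          next hj =>
            fin_cases hm <;> simpa [pvFamScan, pvUpd, hj] using ih _ _ _ _ h _ _ (by simp [pvFams])
      · by_cases h3 : ch ∈ (['A', 'B', 'C', 'D'] : List Char)
        · rcases (by simpa using h3 : ch = 'A' ∨ ch = 'B' ∨ ch = 'C' ∨ ch = 'D') with rfl | rfl | rfl | rfl <;>
          · simp [pvALoop] at h
            fin_cases hm <;> simpa [pvFamScan, pvUpd] using ih _ _ _ _ h _ _ (by simp [pvFams])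
        · by_cases h4 : ch ∈ (['a', 'b', 'c', 'd'] : List Char)
          · rcases (by simpa using h4 : ch = 'a' ∨ ch = 'b' ∨ ch = 'c' ∨ ch = 'd') with rfl | rfl | rfl | rfl <;>
            · simp [pvALoop, pvMP] at h
              split at h
              next hj => simp at h
              next hj =>
                fin_cases hm <;> simpa [pvFamScan, pvUpd, hj] using ih _ _ _ _ h _ _ (by simp [pvFams])
          · simp [pvALoop, h1, h2, h3, h4] at h
            simp only [List.mem_cons, not_or] at h1 h2 h3 h4
            fin_cases hm <;>
              simpa [pvFamScan, h1, h2, h3, h4] using ih _ _ _ _ h _ _ (by simp [pvFams])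

-- a failing combined scan fails for some single family
lemma pvL2 : ∀ (l : List (Int × Char)) (st : Char → List Int) (pp : Char → List (Int × Int)),
    pvALoop l st pp = none →
    ∃ p : Char × Char, p ∈ pvFams ∧ pvFamScan p.1 p.2 l (st p.1) (pp p.1) = none := by
  intro l
  induction l with
  | nil => intro st pp h; simp [pvALoop] at h
  | cons hd rest ih =>
    obtain ⟨i, ch⟩ := hd
    intro st pp h
    by_cases h1 : ch ∈ (['(', '[', '{', '<'] : List Char)
    · rcases (by simpa using h1 : ch = '(' ∨ ch = '[' ∨ ch = '{' ∨ ch = '<') with rfl | rfl | rfl | rfl <;>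
      · simp [pvALoop] at h
        obtain ⟨p, hm, hn⟩ := ih _ _ h
        refine ⟨p, hm, ?_⟩
        fin_cases hm <;> simpa [pvFamScan, pvUpd] using hn
    · by_cases h2 : ch ∈ ([')', ']', '}', '>'] : List Char)
      · rcases (by simpa using h2 : ch = ')' ∨ ch = ']' ∨ ch = '}' ∨ ch = '>') with rfl | rfl | rfl | rfl <;>
        · simp [pvALoop, pvMB] at h
          split at h
          next hj =>
            first
            | (refine ⟨('(', ')'), by simp [pvFams], ?_⟩; simp [pvFamScan, hj]; done)
            | (refine ⟨('[', ']'), by simp [pvFams], ?_⟩; simp [pvFamScan, hj]; done)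
            | (refine ⟨('{', '}'), by simp [pvFams], ?_⟩; simp [pvFamScan, hj]; done)
            | (refine ⟨('<', '>'), by simp [pvFams], ?_⟩; simp [pvFamScan, hj]; done)
          next hj =>
            obtain ⟨p, hm, hn⟩ := ih _ _ h
            refine ⟨p, hm, ?_⟩
            fin_cases hm <;> simpa [pvFamScan, pvUpd, hj] using hn
      · by_cases h3 : ch ∈ (['A', 'B', 'C', 'D'] : List Char)
        · rcases (by simpa using h3 : ch = 'A' ∨ ch = 'B' ∨ ch = 'C' ∨ ch = 'D') with rfl | rfl | rfl | rfl <;>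
          · simp [pvALoop] at h
            obtain ⟨p, hm, hn⟩ := ih _ _ h
            refine ⟨p, hm, ?_⟩
            fin_cases hm <;> simpa [pvFamScan, pvUpd] using hn
        · by_cases h4 : ch ∈ (['a', 'b', 'c', 'd'] : List Char)
          · rcases (by simpa using h4 : ch = 'a' ∨ ch = 'b' ∨ ch = 'c' ∨ ch = 'd') with rfl | rfl | rfl | rfl <;>
            · simp [pvALoop, pvMP] at h
              split at h
              next hj =>
                first
                | (refine ⟨('A', 'a'), by simp [pvFams], ?_⟩; simp [pvFamScan, hj]; done)
                | (refine ⟨('B', 'b'), by simp [pvFams], ?_⟩; simp [pvFamScan, hj]; done)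
                | (refine ⟨('C', 'c'), by simp [pvFams], ?_⟩; simp [pvFamScan, hj]; done)
                | (refine ⟨('D', 'd'), by simp [pvFams], ?_⟩; simp [pvFamScan, hj]; done)
              next hj =>
                obtain ⟨p, hm, hn⟩ := ih _ _ h
                refine ⟨p, hm, ?_⟩
                fin_cases hm <;> simpa [pvFamScan, pvUpd, hj] using hn
          · simp [pvALoop, h1, h2, h3, h4] at h
            simp only [List.mem_cons, not_or] at h1 h2 h3 h4
            obtain ⟨p, hm, hn⟩ := ih _ _ h
            refine ⟨p, hm, ?_⟩
            fin_cases hm <;> simpa [pvFamScan, h1, h2, h3, h4] using hn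

lemma pvRunFams_none : ∀ (fs : List (Char × Char)) (l : List (Int × Char)) (o c : Char),
    (o, c) ∈ fs → pvFamScan o c l [] [] = none → pvRunFams fs l = none := by
  intro fs
  induction fs with
  | nil => intro l o c hm; simp at hm
  | cons hd t ih =>
    obtain ⟨o', c'⟩ := hd
    intro l o c hm hn
    rcases List.mem_cons.mp hm with heq | ht
    · obtain ⟨rfl, rfl⟩ := Prod.mk.injEq .. ▸ heq
      simp [pvRunFams, hn]
    · cases hfs : pvFamScan o' c' l [] [] with
      | none => simp [pvRunFams, hfs]
      | some r => simp [pvRunFams, hfs, ih l o c ht hn]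

lemma pvRunFams_some : ∀ (fs : List (Char × Char)) (l : List (Int × Char))
    (r : Char → Char → List Int × List (Int × Int)),
    (∀ o c, (o, c) ∈ fs → pvFamScan o c l [] [] = some (r o c)) →
    pvRunFams fs l = some (fs.map fun p => r p.1 p.2) := by
  intro fs
  induction fs with
  | nil => intro l r _; simp [pvRunFams]
  | cons hd t ih =>
    obtain ⟨o', c'⟩ := hd
    intro l r hall
    simp [pvRunFams, hall o' c' (by simp), ih l r (fun o c hm => hall o c (by simp [hm]))]


-- ===== VERDICT (by name: the statement is the Claim_ definition above) =====
theorem validate_brackets_with_positions_spec : Claim_equal_validate_brackets_with_positions := by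
  intro s _
  unfold Spec_validate_brackets_with_positions
  unfold validate_brackets_with_positions validate_brackets_with_positions_alt
  cases h : pvALoop (PySem.List.enumerate s.toList) (fun _ => []) (fun _ => []) with
  | none =>
    obtain ⟨p, hm, hn⟩ := pvL2 _ _ _ h
    rw [pvRunFams_none pvFams _ p.1 p.2 (by simpa using hm) hn]
  | some v =>
    obtain ⟨st', pp'⟩ := v
    rw [pvRunFams_some pvFams _ (fun o c => (st' o, pp' o))
      (fun o c hm => pvL1 _ _ _ _ _ h o c hm)]
    rfl
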